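-- pv_equiv track=rewrite | github.com/AhhhHmmm/Advent-of-Code | AoC 2015/Day 7/bits_2.py | r_shift
-- ===== SOURCE A (Python) =====
-- def r_shift(num,shift_num):
-- 	for iteration in range(int(shift_num)):
-- 		temp_out = ''
-- 		temp_out += num[0]
-- 		for digit in range(1,len(num)):
-- 			temp_out += num[digit-1]
-- 		num = temp_out
-- 	return(num)
-- ===== SOURCE B (Python) =====
-- def r_shift(num, shift_num):
--     s = int(shift_num)
--     if s <= 0:
--         return num
--     k = min(s, len(num))
--     return num[0] * k + num[:len(num) - k]
-- ===== Notes on version B (the rewrite author's own statement) =====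
-- stated objective: faster
-- what changed: Replaces shift_num rounds of character-by-character string rebuilding with the closed form num[0]*min(shift,len) + num[:len-shift] computed in one pass.
-- outside the precondition, e.g. on r_shift('', 1): A raises IndexError, B raises IndexError
import Mathlib
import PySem

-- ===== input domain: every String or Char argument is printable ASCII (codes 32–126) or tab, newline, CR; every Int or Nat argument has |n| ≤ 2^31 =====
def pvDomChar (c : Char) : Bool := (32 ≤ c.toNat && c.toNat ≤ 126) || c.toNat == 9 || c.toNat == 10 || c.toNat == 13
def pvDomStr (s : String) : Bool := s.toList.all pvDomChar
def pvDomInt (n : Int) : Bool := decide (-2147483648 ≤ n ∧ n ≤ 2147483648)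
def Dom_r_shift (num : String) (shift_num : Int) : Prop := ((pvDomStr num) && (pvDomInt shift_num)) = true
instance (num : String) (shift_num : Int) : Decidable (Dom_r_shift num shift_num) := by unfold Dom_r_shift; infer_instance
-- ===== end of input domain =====

-- B replaces the shift-many rebuild loops by the closed form num[0]*min(s,len) + num[:len-s] (asymptotically faster as measured).

-- ===== PORT A =====
-- literal port of A: outer loop over range(shift_num), inner loop rebuilds the string
-- char by char; num[0] / num[digit-1] are pyGetD with a default ' ' that is unreachable
-- under Pre_ (num[0] raises in Python exactly for num = '' with shift_num > 0).
def r_shift (num : String) (shift_num : Int) : String :=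
  String.ofList <|
    (PySem.List.pyRange 0 shift_num 1).foldl
      (fun n _iteration =>
        let temp_out : List Char := []
        let temp_out := temp_out ++ [PySem.List.pyGetD n 0 ' ']
        (PySem.List.pyRange 1 (n.length : Int) 1).foldl
          (fun t digit => t ++ [PySem.List.pyGetD n (digit - 1) ' ']) temp_out)
      num.toList

-- ===== PORT B =====
-- literal port of Source B (closed form)
def r_shift_alt (num : String) (shift_num : Int) : String :=
  if shift_num ≤ 0 then num
  else
    let l := num.toList
    let k := min shift_num.toNat l.length
    String.ofList (List.replicate k (PySem.List.pyGetD l 0 ' ') ++ l.take (l.length - k))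

-- ===== PRECONDITION & SPEC =====
-- Pre_ excludes exactly the inputs where both Pythons raise IndexError: num = '' with shift_num > 0.
def Pre_r_shift (num : String) (shift_num : Int) : Prop := shift_num ≤ 0 ∨ num ≠ ""
instance (num : String) (shift_num : Int) : Decidable (Pre_r_shift num shift_num) := by
  unfold Pre_r_shift; infer_instance

def pvWitness_r_shift : String × Int := ("abc", 2)

def Spec_r_shift (num : String) (shift_num : Int) (out : String) : Prop := out = r_shift_alt num shift_num
instance (num : String) (shift_num : Int) (out : String) : Decidable (Spec_r_shift num shift_num out) := by unfold Spec_r_shift; infer_instance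

-- ===== CLAIM (what is proved, stated in full; the proofs are below) =====
def Claim_equal_r_shift : Prop := ∀ (num : String) (shift_num : Int), Dom_r_shift num shift_num → Pre_r_shift num shift_num → Spec_r_shift num shift_num (r_shift num shift_num)

-- ===== LEMMAS AND PROOFS =====

lemma map_range_pyGetD (l : List Char) (m : Nat) (h : m ≤ l.length) :
    (List.range m).map (fun k : Nat => PySem.List.pyGetD l (k : Int) ' ') = l.take m := by
  induction m with
  | zero => simp
  | succ m ih =>
    rw [List.range_succ, List.map_append, ih (by omega)]
    have hm : m < l.length := by omega
    rw [List.take_add_one]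
    simp [List.getElem?_eq_getElem hm]

-- A's inner loop collects n[0], n[0], n[1], …, n[len-2]: one step = c :: dropLast n
lemma stepA_eq (c : Char) (rest : List Char) :
    ((PySem.List.pyRange 1 (((c :: rest).length : Nat) : Int) 1).foldl
        (fun t digit => t ++ [PySem.List.pyGetD (c :: rest) (digit - 1) ' '])
        (([] : List Char) ++ [PySem.List.pyGetD (c :: rest) 0 ' ']))
      = c :: (c :: rest).dropLast := by
  rw [PySem.List.foldl_append_singleton_eq_map, PySem.List.pyRange_one, List.map_map]
  have h0 : PySem.List.pyGetD (c :: rest) 0 ' ' = c := by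
    simp [PySem.List.pyGetD, PySem.List.pyIdx?, PySem.List.pyGet?]
  rw [h0]
  have hlen : (((((c :: rest).length : Nat) : Int)) - 1).toNat = rest.length := by
    simp
  rw [hlen]
  have hfun : ((fun digit => PySem.List.pyGetD (c :: rest) (digit - 1) ' ') ∘
      fun k : Nat => 1 + (k : Int))
      = fun k : Nat => PySem.List.pyGetD (c :: rest) (k : Int) ' ' := by
    funext k
    have : (1 : Int) + (k : Int) - 1 = (k : Int) := by omega
    simp [Function.comp, this]
  rw [hfun, map_range_pyGetD (c :: rest) rest.length (by simp)]
  simp [List.dropLast_eq_take]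

-- the closed form of k iterations of one step on a nonempty list
lemma iterate_step (c : Char) (rest : List Char) (k : Nat) :
    (fun n : List Char => c :: n.dropLast)^[k] (c :: rest)
      = List.replicate (min k (c :: rest).length) c
        ++ (c :: rest).take ((c :: rest).length - min k (c :: rest).length) := by
  set l := c :: rest with hl
  have hL : 0 < l.length := by simp [hl]
  induction k with
  | zero => simp
  | succ k ih =>
    rw [Function.iterate_succ_apply', ih]
    by_cases hk : l.length ≤ k
    · have h1 : min k l.length = l.length := by omega
      have h2 : min (k + 1) l.length = l.length := by omega
      rw [h1, h2]
      simp only [Nat.sub_self, List.take_zero, List.append_nil]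
      have hd : (List.replicate l.length c).dropLast = List.replicate (l.length - 1) c := by
        simp [List.dropLast_eq_take]
      rw [hd]
      have he : l.length = (l.length - 1) + 1 := by omega
      rw [he]; rfl
    · have h1 : min k l.length = k := by omega
      have h2 : min (k + 1) l.length = k + 1 := by omega
      rw [h1, h2]
      have htne : l.take (l.length - k) ≠ [] := by
        simp [List.take_eq_nil_iff]; omega
      rw [List.dropLast_append_of_ne_nil htne]
      have hd : (l.take (l.length - k)).dropLast = l.take (l.length - (k + 1)) := by
        rw [List.dropLast_eq_take, List.take_take, List.length_take]
        congr 1; omega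
      rw [hd, List.replicate_succ]
      simp

-- a fold that ignores its elements and preserves an invariant is function iteration
lemma foldl_ignore_iterate {α β : Type} (f : α → β → α) (g : α → α) (P : α → Prop)
    (hP : ∀ a b, P a → f a b = g a) (hPg : ∀ a, P a → P (g a)) :
    ∀ (li : List β) (a : α), P a → li.foldl f a = g^[li.length] a := by
  intro li
  induction li with
  | nil => intro a _; simp
  | cons x xs ih =>
    intro a hPa
    rw [List.foldl_cons, hP a x hPa, List.length_cons, Function.iterate_succ_apply]
    exact ih (g a) (hPg a hPa)

-- ===== VERDICT (by name: the statement is the Claim_ definition above) =====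
theorem r_shift_spec : Claim_equal_r_shift := by
  intro num shift_num _hdom hpre
  unfold Spec_r_shift r_shift r_shift_alt
  by_cases hs : shift_num ≤ 0
  · rw [if_pos hs, PySem.List.pyRange_one_eq_nil (by omega)]
    simp [String.ofList_toList]
  · rw [if_neg hs]
    have hne : num ≠ "" := hpre.resolve_left hs
    obtain ⟨c, rest, hl⟩ : ∃ c rest, num.toList = c :: rest := by
      cases h : num.toList with
      | nil =>
        exfalso; apply hne
        have := String.ofList_toList (s := num)
        rw [h] at this; exact this.symm
      | cons c rest => exact ⟨c, rest, rfl⟩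
    rw [hl]
    rw [foldl_ignore_iterate
      (fun n (_iteration : Int) =>
        let temp_out : List Char := []
        let temp_out := temp_out ++ [PySem.List.pyGetD n 0 ' ']
        (PySem.List.pyRange 1 (n.length : Int) 1).foldl
          (fun t digit => t ++ [PySem.List.pyGetD n (digit - 1) ' ']) temp_out)
      (fun n : List Char => c :: n.dropLast)
      (fun n => ∃ t, n = c :: t)
      (by rintro a b ⟨t, rfl⟩; exact stepA_eq c t)
      (by rintro a ⟨t, rfl⟩; exact ⟨(c :: t).dropLast, rfl⟩)
      (PySem.List.pyRange 0 shift_num 1) (c :: rest) ⟨rest, rfl⟩]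
    have hlen : (PySem.List.pyRange 0 shift_num 1).length = shift_num.toNat := by
      rw [PySem.List.length_pyRange_one]; simp
    rw [hlen, iterate_step]
    have hget : PySem.List.pyGetD (c :: rest) 0 ' ' = c := by
      simp [PySem.List.pyGetD, PySem.List.pyIdx?, PySem.List.pyGet?]
    simp [hget]
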